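-- pv_equiv track=rewrite | github.com/Drovwosek/hearyou | packages/stt-service/speaker_diarization.py | format_with_speakers
-- ===== SOURCE A (Python) =====
-- from typing import List, Dict, Optional
--
-- def format_with_speakers(words: List[Dict]) -> str:
--     """
--     Форматирует текст с разделением по спикерам
--
--     Args:
--         words: Слова с полем speaker
--
--     Returns:
--         Отформатированный текст с разделением спикеров
--     """
--     if not words:
--         return ""
--
--     lines = []
--     current_speaker = None
--     current_line = []
--
--     for word in words:
--         speaker = word.get("speaker", "UNKNOWN")
--         word_text = word.get("word", "")
--
--         if speaker != current_speaker:
--             # Новый спикер - сохраняем предыдущую строку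
--             if current_line:
--                 lines.append(f"{current_speaker}: {' '.join(current_line)}")
--
--             current_speaker = speaker
--             current_line = [word_text]
--         else:
--             current_line.append(word_text)
--
--     # Последняя строка
--     if current_line:
--         lines.append(f"{current_speaker}: {' '.join(current_line)}")
--
--     return "\n".join(lines)
-- ===== SOURCE B (Python) =====
-- def format_with_speakers(words):
--     lines = []
--     i = 0
--     n = len(words)
--     while i < n:
--         spk = words[i].get("speaker", "UNKNOWN")
--         j = i
--         while j < n and words[j].get("speaker", "UNKNOWN") == spk:
--             j += 1
--         lines.append(f"{spk}: {' '.join(w.get('word', '') for w in words[i:j])}")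
--         i = j
--     return "\n".join(lines)
-- ===== Notes on version B (the rewrite author's own statement) =====
-- stated objective: alternative
-- what changed: Replaces A's state machine (current_speaker/current_line with explicit flushes) by two-pointer span grouping: scan ahead to the end of each same-speaker run and format that whole run at once.
import Mathlib
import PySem

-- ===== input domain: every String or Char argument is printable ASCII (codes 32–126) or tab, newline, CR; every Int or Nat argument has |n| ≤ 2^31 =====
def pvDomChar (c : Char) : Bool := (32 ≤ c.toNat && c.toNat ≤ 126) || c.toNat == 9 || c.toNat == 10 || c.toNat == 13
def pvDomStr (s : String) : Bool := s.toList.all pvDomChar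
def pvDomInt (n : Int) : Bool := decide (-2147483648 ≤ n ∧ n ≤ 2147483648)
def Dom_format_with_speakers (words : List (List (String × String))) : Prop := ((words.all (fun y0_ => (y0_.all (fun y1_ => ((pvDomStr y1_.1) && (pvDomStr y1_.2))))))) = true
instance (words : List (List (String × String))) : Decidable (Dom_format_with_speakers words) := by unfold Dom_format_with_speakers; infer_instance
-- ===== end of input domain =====

-- B replaces A's current_speaker/current_line state machine by two-pointer span grouping
-- over same-speaker runs (alternative decomposition; same cost).


-- ===== PORT A =====
-- w.get("speaker", "UNKNOWN") / w.get("word", "")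
def pvSpk (w : List (String × String)) : String := (PySem.Dict.mk w).getD "speaker" "UNKNOWN"
def pvWord (w : List (String × String)) : String := (PySem.Dict.mk w).getD "word" ""

-- f"{current_speaker}: {' '.join(current_line)}" (current_speaker is None before the first word)
def fmtA (cur : Option String) (line : List String) : String :=
  (match cur with | none => "None" | some s => s) ++ ": " ++ PySem.Str.join " " line

-- the loop body of A: state = (lines, current_speaker, current_line)
def stepA (st : List String × Option String × List String) (w : List (String × String)) :
    List String × Option String × List String :=
  let speaker := pvSpk w
  let wordText := pvWord w
  if some speaker ≠ st.2.1 then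
    ((if st.2.2 ≠ [] then st.1 ++ [fmtA st.2.1 st.2.2] else st.1), some speaker, [wordText])
  else
    (st.1, st.2.1, st.2.2 ++ [wordText])

-- the final flush after the loop
def finishA (st : List String × Option String × List String) : List String :=
  st.1 ++ (if st.2.2 ≠ [] then [fmtA st.2.1 st.2.2] else [])

def format_with_speakers (words : List (List (String × String))) : String :=
  if words = [] then ""
  else PySem.Str.join "\n" (finishA (words.foldl stepA ([], none, [])))

-- ===== PORT B =====
-- B's outer while: each iteration takes the maximal same-speaker run (inner while = span scan)
-- and formats it as one line.
def bLines : List (List (String × String)) → List String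
  | [] => []
  | w :: rest =>
    let k := pvSpk w
    (k ++ ": " ++ PySem.Str.join " " (pvWord w :: (rest.takeWhile (fun x => pvSpk x == k)).map pvWord))
      :: bLines (rest.dropWhile (fun x => pvSpk x == k))
termination_by ws => ws.length
decreasing_by
  simp only [List.length_cons]
  exact Nat.lt_succ_of_le (List.length_dropWhile_le _ _)

def format_with_speakers_alt (words : List (List (String × String))) : String :=
  PySem.Str.join "\n" (bLines words)

-- ===== PRECONDITION & SPEC =====
def Spec_format_with_speakers (words : List (List (String × String))) (out : String) : Prop := out = format_with_speakers_alt words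
instance (words : List (List (String × String))) (out : String) : Decidable (Spec_format_with_speakers words out) := by unfold Spec_format_with_speakers; infer_instance

-- ===== CLAIM (what is proved, stated in full; the proofs are below) =====
def Claim_equal_format_with_speakers : Prop := ∀ (words : List (List (String × String))), Dom_format_with_speakers words → Spec_format_with_speakers words (format_with_speakers words)

-- ===== LEMMAS AND PROOFS =====

-- Loop invariant: with a pending nonempty current_line `acc` for speaker `s`, A's remaining fold
-- first extends `acc` by the rest of s's run, emits that line, and then produces exactly B's lines.
theorem mainA (ws : List (List (String × String))) :
    ∀ (lines : List String) (s : String) (acc : List String), acc ≠ [] →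
    finishA (ws.foldl stepA (lines, some s, acc)) =
      lines ++ (s ++ ": " ++ PySem.Str.join " " (acc ++ (ws.takeWhile (fun x => pvSpk x == s)).map pvWord))
            :: bLines (ws.dropWhile (fun x => pvSpk x == s)) := by
  induction ws with
  | nil =>
    intro lines s acc hacc
    simp [finishA, fmtA, hacc, bLines]
  | cons w ws ih =>
    intro lines s acc hacc
    by_cases h : pvSpk w = s
    · have hstep : stepA (lines, some s, acc) w = (lines, some s, acc ++ [pvWord w]) := by
        simp [stepA, h]
      simp only [List.foldl_cons, hstep]
      rw [ih lines s (acc ++ [pvWord w]) (by simp)]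
      simp [h, List.append_assoc]
    · have hstep : stepA (lines, some s, acc) w
          = (lines ++ [fmtA (some s) acc], some (pvSpk w), [pvWord w]) := by
        simp [stepA, h, hacc]
      simp only [List.foldl_cons, hstep]
      rw [ih (lines ++ [fmtA (some s) acc]) (pvSpk w) [pvWord w] (by simp)]
      simp [h, fmtA, bLines]

-- ===== VERDICT (by name: the statement is the Claim_ definition above) =====
theorem format_with_speakers_spec : Claim_equal_format_with_speakers := by
  intro words _
  unfold Spec_format_with_speakers
  cases words with
  | nil => simp [format_with_speakers, format_with_speakers_alt, bLines, PySem.Str.join]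
  | cons w ws =>
    have hstep : stepA ([], none, []) w = ([], some (pvSpk w), [pvWord w]) := by
      simp [stepA]
    simp only [format_with_speakers, format_with_speakers_alt, if_neg (List.cons_ne_nil w ws),
      List.foldl_cons, hstep]
    rw [mainA ws [] (pvSpk w) [pvWord w] (by simp)]
    simp [bLines]
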